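-- pv_equiv track=rewrite | github.com/lucolazo/Algoritmos-2025 | Ej22.py | usar_la_fuerza
-- ===== SOURCE A (Python) =====
-- def usar_la_fuerza(m, contador=0):
--     if len(m) == 0:       # Caso base: mochila vacía
--         return False, contador
--
--     objeto = m[0]   #Saca el primer objeto de la mochila
--     contador += 1       # Empieza a contar
--
--     if objeto == 'sable de luz':
--         return True, contador
--     else:                          # Si el objeto no es el sable, entonces se llama de nuevo a la función con el resto de la mochila (m[1:], o sea, sin el primer objeto).
--         return usar_la_fuerza(m[1:], contador)      # Se pasa también el contador actualizado.
-- ===== SOURCE B (Python) =====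
-- def usar_la_fuerza(m, contador=0):
--     for objeto in m:
--         contador += 1
--         if objeto == 'sable de luz':
--             return True, contador
--     return False, contador
-- ===== Notes on version B (the rewrite author's own statement) =====
-- stated objective: faster
-- what changed: Replaced the recursion that slices m[1:] at every step by a single iterative for-loop over the list with an in-place counter.
import Mathlib
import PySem

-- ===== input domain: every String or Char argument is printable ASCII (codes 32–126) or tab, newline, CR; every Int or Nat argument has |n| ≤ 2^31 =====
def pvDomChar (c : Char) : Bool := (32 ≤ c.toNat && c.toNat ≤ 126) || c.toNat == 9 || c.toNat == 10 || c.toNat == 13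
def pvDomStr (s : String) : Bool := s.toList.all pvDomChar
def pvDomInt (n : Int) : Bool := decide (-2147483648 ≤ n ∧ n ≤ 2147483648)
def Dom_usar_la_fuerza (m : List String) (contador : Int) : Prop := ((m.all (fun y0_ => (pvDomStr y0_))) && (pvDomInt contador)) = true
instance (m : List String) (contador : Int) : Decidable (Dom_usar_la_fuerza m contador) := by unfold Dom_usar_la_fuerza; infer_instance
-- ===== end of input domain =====

-- B replaces A's recursion-with-slicing by a single iterative loop over the list (simpler).

-- ===== PORT A =====
-- literal transliteration of A's recursion: empty check, take head, increment, compare, recurse on tail (m[1:])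
def usar_la_fuerza (m : List String) (contador : Int) : Bool × Int :=
  match m with
  | [] => (false, contador)
  | objeto :: rest =>
    let contador := contador + 1
    if objeto == "sable de luz" then (true, contador)
    else usar_la_fuerza (PySem.List.slice (objeto :: rest) (some 1) none) contador
termination_by m.length
decreasing_by simp [PySem.List.slice_from_one]

-- ===== PORT B =====
-- iterative loop: fold over the list carrying (done?, contador), early exit modeled by the flag
def usar_la_fuerza_alt (m : List String) (contador : Int) : Bool × Int :=
  let r := m.foldl (fun (st : Bool × Int) objeto =>
      if st.1 then st
      else
        let c := st.2 + 1
        if objeto == "sable de luz" then (true, c) else (false, c))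
    (false, contador)
  r

-- ===== PRECONDITION & SPEC =====
def Spec_usar_la_fuerza (m : List String) (contador : Int) (out : Bool × Int) : Prop := out = usar_la_fuerza_alt m contador
instance (m : List String) (contador : Int) (out : Bool × Int) : Decidable (Spec_usar_la_fuerza m contador out) := by unfold Spec_usar_la_fuerza; infer_instance

-- ===== CLAIM (what is proved, stated in full; the proofs are below) =====
def Claim_equal_usar_la_fuerza : Prop := ∀ (m : List String) (contador : Int), Dom_usar_la_fuerza m contador → Spec_usar_la_fuerza m contador (usar_la_fuerza m contador)

-- ===== LEMMAS AND PROOFS =====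

-- once the fold's flag is true, the state never changes again
theorem alt_foldl_true (m : List String) (c : Int) :
    m.foldl (fun (st : Bool × Int) objeto =>
      if st.1 then st
      else
        let cc := st.2 + 1
        if objeto == "sable de luz" then (true, cc) else (false, cc)) (true, c) = (true, c) := by
  induction m with
  | nil => rfl
  | cons x xs ih => simpa using ih

theorem usar_eq_alt (m : List String) (contador : Int) :
    usar_la_fuerza m contador = usar_la_fuerza_alt m contador := by
  induction m generalizing contador with
  | nil => rw [usar_la_fuerza]; rfl
  | cons x xs ih =>
    rw [usar_la_fuerza]
    cases hb : (x == "sable de luz") with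
    | true =>
      show (true, contador + 1) = usar_la_fuerza_alt (x :: xs) contador
      unfold usar_la_fuerza_alt
      simp only [List.foldl_cons, hb]
      exact (alt_foldl_true xs (contador + 1)).symm
    | false =>
      show usar_la_fuerza (PySem.List.slice (x :: xs) (some 1) none) (contador + 1) =
        usar_la_fuerza_alt (x :: xs) contador
      rw [PySem.List.slice_from_one, List.tail_cons, ih]
      unfold usar_la_fuerza_alt
      have hx : x ≠ "sable de luz" := by simpa using hb
      simp [hx]

-- ===== VERDICT (by name: the statement is the Claim_ definition above) =====
theorem usar_la_fuerza_spec : Claim_equal_usar_la_fuerza := by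
  intro m contador _
  exact usar_eq_alt m contador
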